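-- pv_equiv track=rewrite | github.com/asdil12/pymultimonaprs | keygen.py | generate
-- ===== SOURCE A (Python) =====
-- def generate(callsign):
-- 	# This method derived from the xastir project under a GPL license.
-- 	seed = 0x73E2
--
-- 	odd = True
-- 	key = seed
-- 	for char in callsign.upper():
-- 		proc_char = ord(char)
-- 		if odd:
-- 			proc_char <<= 8
-- 		key = key ^ proc_char
-- 		odd = not odd
-- 	key &= 0x7FFF
-- 	return key
-- ===== SOURCE B (Python) =====
-- def generate(callsign):
--     # Fold the callsign two characters at a time: each pair forms one
--     # 16-bit word XORed into the key (high byte from the first char,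
--     # low byte from the second); a trailing odd character supplies only
--     # the high byte.  No odd/even flag is maintained.
--     s = callsign.upper()
--     key = 0x73E2
--     n = len(s)
--     i = 0
--     while i + 2 <= n:
--         key = key ^ (ord(s[i]) << 8) ^ ord(s[i + 1])
--         i += 2
--     if i < n:
--         key ^= ord(s[i]) << 8
--     return key & 0x7FFF
-- ===== Notes on version B (the rewrite author's own statement) =====
-- stated objective: alternative
-- what changed: Replaces the single flag-toggling per-character loop with a recursion that consumes the callsign two characters at a time, XORing one 16-bit word (high byte from the first, low byte from the second) per step, with a trailing odd character handled separately.
import Mathlib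
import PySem

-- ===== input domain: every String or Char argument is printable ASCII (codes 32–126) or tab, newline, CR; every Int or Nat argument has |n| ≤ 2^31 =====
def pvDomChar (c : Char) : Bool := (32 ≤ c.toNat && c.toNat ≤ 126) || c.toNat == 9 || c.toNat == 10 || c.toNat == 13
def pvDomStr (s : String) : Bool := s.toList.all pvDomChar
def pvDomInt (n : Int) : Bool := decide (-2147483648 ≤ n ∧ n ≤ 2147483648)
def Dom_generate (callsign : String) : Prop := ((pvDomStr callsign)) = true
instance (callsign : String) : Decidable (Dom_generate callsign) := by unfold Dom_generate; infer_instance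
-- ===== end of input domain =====

-- B folds the callsign two characters at a time (one 16-bit word per step), no odd/even flag;
-- same return value, similar cost (objective: alternative decomposition).

-- ===== PORT A =====
-- state (odd, key); each char is XORed in, shifted by 8 when odd is set
def generate (callsign : String) : Int :=
  let st := (PySem.Str.upper callsign).toList.foldl
    (fun (st : Bool × Int) (c : Char) =>
      let proc : Int := if st.1 then ((c.toNat : Int)) <<< 8 else (c.toNat : Int)
      (!st.1, PySem.Int.bxor st.2 proc))
    (true, 0x73E2)
  PySem.Int.band st.2 0x7FFF

-- ===== PORT B =====
-- transcription of B's pair-at-a-time while loop as the obvious two-element structural recursion (exact: the loop consumes s[i], s[i+1] and advances i by 2; the trailing branch is the one-element case)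
def pvMix : List Char → Int → Int
  | [], key => key
  | [c], key => PySem.Int.bxor key (((c.toNat : Int)) <<< 8)
  | c1 :: c2 :: rest, key =>
      pvMix rest (PySem.Int.bxor (PySem.Int.bxor key (((c1.toNat : Int)) <<< 8)) (c2.toNat : Int))

def generate_alt (callsign : String) : Int :=
  PySem.Int.band (pvMix (PySem.Str.upper callsign).toList 0x73E2) 0x7FFF

-- ===== PRECONDITION & SPEC =====
def Spec_generate (callsign : String) (out : Int) : Prop := out = generate_alt callsign
instance (callsign : String) (out : Int) : Decidable (Spec_generate callsign out) := by unfold Spec_generate; infer_instance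

-- ===== CLAIM (what is proved, stated in full; the proofs are below) =====
def Claim_equal_generate : Prop := ∀ (callsign : String), Dom_generate callsign → Spec_generate callsign (generate callsign)


-- ===== LEMMAS AND PROOFS =====
theorem pvFold_eq_mix : ∀ (l : List Char) (key : Int),
    (l.foldl
      (fun (st : Bool × Int) (c : Char) =>
        let proc : Int := if st.1 then ((c.toNat : Int)) <<< 8 else (c.toNat : Int)
        (!st.1, PySem.Int.bxor st.2 proc))
      (true, key)).2 = pvMix l key
  | [], _ => rfl
  | [_], _ => by simp [pvMix]
  | c1 :: c2 :: rest, key => by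
      simpa [pvMix] using pvFold_eq_mix rest (PySem.Int.bxor (PySem.Int.bxor key (((c1.toNat : Int)) <<< 8)) (c2.toNat : Int))


-- ===== VERDICT (by name: the statement is the Claim_ definition above) =====
theorem generate_spec : Claim_equal_generate := by
  intro callsign _
  unfold Spec_generate generate generate_alt
  simp only [pvFold_eq_mix]
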